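-- pv_equiv track=rewrite | github.com/AidanMDB/Software-Tools-Labs | Lab08/main.py | combine_variables
-- ===== SOURCE A (Python) =====
-- def combine_variables(a, b):
--     # This is where we combine the variables a and b
--     # Don't worry much about what this does, just try to see if
--     # there are any extra cases to test
--
--     return_value = a ^ b
--
--     for i in range(0, a+b):
--         return_value ^= (a ^  b)
--
--     j = 1
--
--     while return_value < 0:
--         return_value += j
--         j += 1
--
--     return return_value
-- ===== SOURCE B (Python) =====
-- def combine_variables(a, b):
--     # XOR-parity closed form for the loop, binary search for the triangular fixup.
--     n = a + b
--     v = (a ^ b) if (n <= 0 or n % 2 == 0) else 0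
--     if v >= 0:
--         return v
--     need = -v
--     lo, hi = 0, need
--     while lo < hi:
--         mid = (lo + hi) // 2
--         if mid * (mid + 1) // 2 >= need:
--             hi = mid
--         else:
--             lo = mid + 1
--     return v + lo * (lo + 1) // 2
-- ===== Notes on version B (the rewrite author's own statement) =====
-- stated objective: faster
-- what changed: replaces the O(a+b) XOR loop by its parity closed form and the linear increment-until-nonnegative loop by a binary search for the least triangular number reaching -v
import Mathlib
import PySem

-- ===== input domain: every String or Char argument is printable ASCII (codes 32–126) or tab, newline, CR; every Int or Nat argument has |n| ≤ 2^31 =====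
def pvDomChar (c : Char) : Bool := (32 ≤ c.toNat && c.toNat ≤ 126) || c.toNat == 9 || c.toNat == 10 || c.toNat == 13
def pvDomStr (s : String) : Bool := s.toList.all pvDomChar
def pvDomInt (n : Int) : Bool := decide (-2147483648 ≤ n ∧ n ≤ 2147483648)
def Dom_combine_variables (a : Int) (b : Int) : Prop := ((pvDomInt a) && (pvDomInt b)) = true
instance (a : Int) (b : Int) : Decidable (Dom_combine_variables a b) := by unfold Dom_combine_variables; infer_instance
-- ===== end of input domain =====

-- B replaces A's O(a+b) XOR loop by its parity closed form and A's linear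
-- increment loop by a binary search for the least sufficient triangular number.

-- ===== PORT A =====
-- 'while return_value < 0: return_value += j; j += 1'.  A's j starts at 1 and
-- only grows; here j = jm1 + 1 (jm1 : Nat), an exact encoding used for termination.
def pyAfix (rv : Int) (jm1 : Nat) : Int :=
  if rv < 0 then pyAfix (rv + ((jm1 : Int) + 1)) (jm1 + 1) else rv
termination_by (-rv).toNat
decreasing_by omega

def combine_variables (a : Int) (b : Int) : Int :=
  let rv0 := PySem.Int.bxor a b
  let rv1 := (PySem.List.pyRange 0 (a + b) 1).foldl
    (fun acc _ => PySem.Int.bxor acc (PySem.Int.bxor a b)) rv0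
  pyAfix rv1 0

-- ===== PORT B =====
-- Source B's binary search: least k in [lo,hi] with k*(k+1)//2 >= need
def bsearchB (lo hi need : Int) : Int :=
  if lo < hi then
    let mid := PySem.Int.floordiv (lo + hi) 2
    if need ≤ PySem.Int.floordiv (mid * (mid + 1)) 2 then bsearchB lo mid need
    else bsearchB (mid + 1) hi need
  else lo
termination_by (hi - lo).toNat
decreasing_by
  · have h2 := PySem.Int.floordiv_eq_ediv_of_pos (a := lo + hi) (b := 2) (by norm_num)
    omega
  · have h2 := PySem.Int.floordiv_eq_ediv_of_pos (a := lo + hi) (b := 2) (by norm_num)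
    omega

def combine_variables_alt (a : Int) (b : Int) : Int :=
  let n := a + b
  let v := if n ≤ 0 ∨ PySem.Int.mod n 2 = 0 then PySem.Int.bxor a b else 0
  if 0 ≤ v then v
  else
    let need := -v
    let lo := bsearchB 0 need need
    v + PySem.Int.floordiv (lo * (lo + 1)) 2

-- ===== PRECONDITION & SPEC =====
def Spec_combine_variables (a : Int) (b : Int) (out : Int) : Prop := out = combine_variables_alt a b
instance (a : Int) (b : Int) (out : Int) : Decidable (Spec_combine_variables a b out) := by unfold Spec_combine_variables; infer_instance

-- ===== CLAIM (what is proved, stated in full; the proofs are below) =====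
def Claim_equal_combine_variables : Prop := ∀ (a : Int) (b : Int), Dom_combine_variables a b → Spec_combine_variables a b (combine_variables a b)

-- ===== LEMMAS AND PROOFS =====

-- triangular numbers
def triN (k : Nat) : Int := ((k * (k + 1) / 2 : Nat) : Int)

theorem triN_succ (k : Nat) : triN (k + 1) = triN k + (k + 1) := by
  unfold triN
  have h : (k + 1) * (k + 1 + 1) = k * (k + 1) + (k + 1) * 2 := by ring
  rw [h, Nat.add_mul_div_right _ _ (by norm_num : 0 < 2)]
  push_cast; ring

theorem triN_ge (k : Nat) : (k : Int) ≤ triN k := by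
  unfold triN
  have h : k ≤ k * (k + 1) / 2 := by
    rcases Nat.eq_zero_or_pos k with h | h
    · simp [h]
    · have : k * 2 ≤ k * (k + 1) := Nat.mul_le_mul_left _ (by omega)
      omega
  exact_mod_cast h

theorem triN_mono {j k : Nat} (h : j ≤ k) : triN j ≤ triN k := by
  unfold triN
  have h2 : j * (j + 1) ≤ k * (k + 1) := Nat.mul_le_mul h (by omega)
  exact_mod_cast Nat.div_le_div_right (c := 2) h2

theorem bxor_cancel (a b : Int) : PySem.Int.bxor (PySem.Int.bxor a b) b = a := by
  unfold PySem.Int.bxor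
  by_cases ha : 0 ≤ a <;> by_cases hb : 0 ≤ b
  · simp [ha, hb, Nat.xor_xor_cancel_right]
  · rw [if_pos ha, if_neg hb, if_neg (by omega), if_neg hb]
    have h1 : (-(-((a.toNat ^^^ (-b - 1).toNat : Nat) : Int) - 1) - 1).toNat
        = a.toNat ^^^ (-b - 1).toNat := by omega
    rw [h1, Nat.xor_xor_cancel_right]; omega
  · rw [if_neg ha, if_pos hb, if_neg (by omega), if_pos hb]
    have h1 : (-(-(((-a - 1).toNat ^^^ b.toNat : Nat) : Int) - 1) - 1).toNat
        = (-a - 1).toNat ^^^ b.toNat := by omega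
    rw [h1, Nat.xor_xor_cancel_right]; omega
  · rw [if_neg ha, if_neg hb, if_pos (by positivity), if_neg hb]
    have h1 : ((((-a - 1).toNat ^^^ (-b - 1).toNat : Nat) : Int)).toNat
        = (-a - 1).toNat ^^^ (-b - 1).toNat := by omega
    rw [h1, Nat.xor_xor_cancel_right]; omega

theorem fold_bxor_parity (l : List Int) (acc x : Int) :
    l.foldl (fun a _ => PySem.Int.bxor a x) acc =
      if l.length % 2 = 0 then acc else PySem.Int.bxor acc x := by
  induction l generalizing acc with
  | nil => simp
  | cons h t ih =>
    simp only [List.foldl_cons, List.length_cons, ih, bxor_cancel]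
    rcases Nat.even_or_odd t.length with he | ho
    · rw [Nat.even_iff] at he
      rw [if_pos he, if_neg (by omega)]
    · rw [Nat.odd_iff] at ho
      rw [if_neg (by omega), if_pos (by omega)]

theorem exists_tri (v : Int) (m : Nat) : ∃ k : Nat, 0 ≤ v + triN (m + k) := by
  refine ⟨(-v).toNat, ?_⟩
  have h1 := triN_ge (m + (-v).toNat)
  omega

theorem pyAfix_eq_find_aux (n : Nat) : ∀ (m : Nat) (v : Int), (-(v + triN m)).toNat ≤ n →
    pyAfix (v + triN m) m = v + triN (m + Nat.find (exists_tri v m)) := by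
  induction n with
  | zero =>
    intro m v hle
    rw [pyAfix, if_neg (by omega)]
    have hf : Nat.find (exists_tri v m) = 0 := by
      rw [Nat.find_eq_zero]
      simpa using (by omega : 0 ≤ v + triN m)
    simp [hf]
  | succ n ih =>
    intro m v hle
    by_cases h : v + triN m < 0
    · rw [pyAfix, if_pos h]
      have hstep : v + triN m + ((m : Int) + 1) = v + triN (m + 1) := by
        rw [triN_succ]; ring
      rw [hstep]
      have hmeas : (-(v + triN (m + 1))).toNat ≤ n := by
        have := triN_succ m; omega
      rw [ih (m + 1) v hmeas]
      have key : m + Nat.find (exists_tri v m) = (m + 1) + Nat.find (exists_tri v (m + 1)) := by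
        set f0 := Nat.find (exists_tri v m) with hf0
        set f1 := Nat.find (exists_tri v (m + 1)) with hf1
        have hP0 : 0 ≤ v + triN (m + f0) := Nat.find_spec (exists_tri v m)
        have hP1 : 0 ≤ v + triN ((m + 1) + f1) := Nat.find_spec (exists_tri v (m + 1))
        have hne : f0 ≠ 0 := by
          intro h0
          rw [h0] at hP0; simp at hP0; omega
        obtain ⟨j, hj⟩ : ∃ j, f0 = j + 1 := ⟨f0 - 1, by omega⟩
        have hle1 : f0 ≤ f1 + 1 := by
          apply Nat.find_le
          have : m + (f1 + 1) = (m + 1) + f1 := by omega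
          rw [this]; exact hP1
        have hle2 : f1 ≤ j := by
          apply Nat.find_le
          have : (m + 1) + j = m + (j + 1) := by omega
          rw [this, ← hj]; exact hP0
        omega
      rw [key]
    · rw [pyAfix, if_neg h]
      have hf : Nat.find (exists_tri v m) = 0 := by
        rw [Nat.find_eq_zero]; simpa using not_lt.mp h
      simp [hf]

theorem pyAfix_eq_find (m : Nat) (v : Int) :
    pyAfix (v + triN m) m = v + triN (m + Nat.find (exists_tri v m)) :=
  pyAfix_eq_find_aux (-(v + triN m)).toNat m v le_rfl

theorem triB_natCast (k : Nat) :
    PySem.Int.floordiv ((k : Int) * ((k : Int) + 1)) 2 = triN k := by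
  have h1 : (k : Int) * ((k : Int) + 1) = ((k * (k + 1) : Nat) : Int) := by push_cast; ring
  rw [h1]
  have h2 := PySem.Int.floordiv_natCast (k * (k + 1)) 2
  exact_mod_cast h2

theorem triB_mono {i j : Int} (hi : 0 ≤ i) (hij : i ≤ j) :
    PySem.Int.floordiv (i * (i + 1)) 2 ≤ PySem.Int.floordiv (j * (j + 1)) 2 := by
  have h1 : i = ((i.toNat : Nat) : Int) := by omega
  have h2 : j = ((j.toNat : Nat) : Int) := by omega
  rw [h1, h2, triB_natCast, triB_natCast]
  exact triN_mono (by omega)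

theorem bsearchB_eq_aux (n : Nat) : ∀ (lo hi need r : Int), (hi - lo).toNat ≤ n → 0 ≤ lo → lo ≤ hi →
    lo ≤ r → r ≤ hi → need ≤ PySem.Int.floordiv (r * (r + 1)) 2 →
    (∀ i : Int, lo ≤ i → i < r → PySem.Int.floordiv (i * (i + 1)) 2 < need) →
    bsearchB lo hi need = r := by
  induction n with
  | zero =>
    intro lo hi need r hn h0 hlh hr1 hr2 hr3 hr4
    rw [bsearchB, if_neg (by omega)]
    omega
  | succ n ih =>
    intro lo hi need r hn h0 hlh hr1 hr2 hr3 hr4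
    by_cases hlt : lo < hi
    · rw [bsearchB, if_pos hlt]
      have hmid := PySem.Int.floordiv_eq_ediv_of_pos (a := lo + hi) (b := 2) (by norm_num)
      set mid := PySem.Int.floordiv (lo + hi) 2 with hmiddef
      have hb1 : lo ≤ mid := by omega
      have hb2 : mid < hi := by omega
      by_cases hc : need ≤ PySem.Int.floordiv (mid * (mid + 1)) 2
      · rw [if_pos hc]
        have hrm : r ≤ mid := by
          by_contra hcon
          have := hr4 mid hb1 (by omega)
          omega
        exact ih lo mid need r (by omega) h0 (by omega) hr1 hrm hr3 hr4
      · rw [if_neg hc]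
        have hrm : mid + 1 ≤ r := by
          by_contra hcon
          have := triB_mono (i := r) (j := mid) (by omega) (by omega)
          omega
        exact ih (mid + 1) hi need r (by omega) (by omega) (by omega) hrm hr2 hr3
          (fun i hi1 hi2 => hr4 i (by omega) hi2)
    · rw [bsearchB, if_neg hlt]
      omega

theorem bsearchB_eq (lo hi need r : Int) (h0 : 0 ≤ lo) (hlh : lo ≤ hi)
    (hr1 : lo ≤ r) (hr2 : r ≤ hi) (hr3 : need ≤ PySem.Int.floordiv (r * (r + 1)) 2)
    (hr4 : ∀ i : Int, lo ≤ i → i < r → PySem.Int.floordiv (i * (i + 1)) 2 < need) :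
    bsearchB lo hi need = r :=
  bsearchB_eq_aux (hi - lo).toNat lo hi need r le_rfl h0 hlh hr1 hr2 hr3 hr4

-- ===== VERDICT (by name: the statement is the Claim_ definition above) =====
theorem combine_variables_spec : Claim_equal_combine_variables := by
  intro a b _
  unfold Spec_combine_variables combine_variables combine_variables_alt
  simp only [fold_bxor_parity, PySem.List.length_pyRange_one]
  have hmod := PySem.Int.mod_eq_emod_of_pos (a := a + b) (b := 2) (by norm_num)
  have hv : (if (a + b - 0).toNat % 2 = 0 then PySem.Int.bxor a b
        else PySem.Int.bxor (PySem.Int.bxor a b) (PySem.Int.bxor a b))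
      = (if a + b ≤ 0 ∨ PySem.Int.mod (a + b) 2 = 0 then PySem.Int.bxor a b else 0) := by
    by_cases hc : (a + b - 0).toNat % 2 = 0
    · rw [if_pos hc, if_pos (by omega)]
    · rw [if_neg hc, if_neg (by omega), PySem.Int.bxor_self]
  rw [hv]
  set v := (if a + b ≤ 0 ∨ PySem.Int.mod (a + b) 2 = 0 then PySem.Int.bxor a b else 0) with hvdef
  by_cases hvn : 0 ≤ v
  · rw [if_pos hvn, pyAfix, if_neg (by omega)]
  · rw [if_neg hvn]
    have hKspec := Nat.find_spec (exists_tri v 0)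
    set K := Nat.find (exists_tri v 0) with hK
    simp only [Nat.zero_add] at hKspec
    have hbs : bsearchB 0 (-v) (-v) = (K : Int) := by
      apply bsearchB_eq
      · omega
      · omega
      · omega
      · have hfl : K ≤ (-v).toNat := by
          apply Nat.find_le
          have := triN_ge (0 + (-v).toNat)
          omega
        omega
      · rw [triB_natCast]; omega
      · intro i hi0 hiK
        have h1 : i = ((i.toNat : Nat) : Int) := by omega
        rw [h1, triB_natCast]
        have hmin := Nat.find_min (exists_tri v 0) (m := i.toNat) (by omega)
        simp only [Nat.zero_add, not_le] at hmin
        omega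
    rw [hbs, triB_natCast]
    have h0 : triN 0 = 0 := rfl
    have hfix : pyAfix v 0 = v + triN K := by
      have h2 := pyAfix_eq_find 0 v
      rw [h0, add_zero, Nat.zero_add] at h2
      exact h2
    rw [hfix]
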